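-- pv_equiv track=rewrite | github.com/Coco-Jambo/Comp202assignments | Assignment3/image_processing.py | is_valid_image
-- ===== SOURCE A (Python) =====
-- def is_valid_image(nested_list):
--     """(list<list>)->boolean
--     Retrurns True if nested_list contains integers between 0 and 255 and if each list is of the same length
--     Returns False otherwise.
--
--     >>> is_valid_image([[1, 2, 3], [4, 5, 6], [7, 8]])
--     False
--     >>> is_valid_image([["111x7", "200x2", "0x5"], [4, 5, 6], [7, 8]])
--     False
--     >>> is_valid_image([[1, 2], [4, 5], [7, 8]])
--     True
--     """
--
--     is_valid = True
--     previous_elmnt = nested_list[0]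
--
--     for elmnt in nested_list:
--         if len(elmnt) == len(previous_elmnt):
--             previous_elmnt = elmnt
--             for sub_elmnt in elmnt:
--                 if type(sub_elmnt) != int:
--                     is_valid = False
--                     break
--                 elif(sub_elmnt < 0 or sub_elmnt > 255):
--                     is_valid = False
--                     break
--         else:
--             is_valid = False
--             break
--
--     return is_valid
-- ===== SOURCE B (Python) =====
-- def is_valid_image(nested_list):
--     n = len(nested_list[0])
--     if any(len(row) != n for row in nested_list):
--         return False
--     return all(type(x) is int and 0 <= x <= 255 for row in nested_list for x in row)
-- ===== Notes on version B (the rewrite author's own statement) =====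
-- stated objective: simpler
-- what changed: Replaced the single interleaved loop with mutable flag, break and previous-row chaining by two separate whole-list passes (any over row lengths against the first row's length, then all over the elements, keeping A's type(x) is int value check).
import Mathlib
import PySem

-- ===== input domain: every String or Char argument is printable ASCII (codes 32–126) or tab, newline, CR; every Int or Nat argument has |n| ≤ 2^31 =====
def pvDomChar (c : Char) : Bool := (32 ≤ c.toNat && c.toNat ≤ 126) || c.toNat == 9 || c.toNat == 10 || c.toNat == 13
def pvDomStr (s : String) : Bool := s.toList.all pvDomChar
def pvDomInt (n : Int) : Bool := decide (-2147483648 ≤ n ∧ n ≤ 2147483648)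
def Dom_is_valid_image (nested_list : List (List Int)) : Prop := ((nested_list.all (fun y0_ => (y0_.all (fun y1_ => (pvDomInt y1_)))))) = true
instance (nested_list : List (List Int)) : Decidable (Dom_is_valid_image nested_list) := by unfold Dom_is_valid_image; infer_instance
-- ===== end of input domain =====

-- B replaces A's interleaved flag/break/previous-row loop by two separate whole-list passes
-- (length pass against the first row, then a value pass with A's same value test); objective: simpler.


-- ===== PORT A =====
-- inner 'for sub_elmnt in elmnt' loop: sets is_valid := False and breaks on a bad value
-- ('type(sub_elmnt) != int' is identically false here: elements are Int by the type convention)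
def pyInnerA (elmnt : List Int) (is_valid : Bool) : Bool :=
  match elmnt with
  | [] => is_valid
  | x :: rest => if x < 0 ∨ x > 255 then false else pyInnerA rest is_valid

-- outer 'for elmnt in nested_list' loop, carrying previous_elmnt and is_valid; break = return false
def pyOuterA (rows : List (List Int)) (previous_elmnt : List Int) (is_valid : Bool) : Bool :=
  match rows with
  | [] => is_valid
  | e :: rest =>
    if e.length = previous_elmnt.length then pyOuterA rest e (pyInnerA e is_valid)
    else false

def is_valid_image (nested_list : List (List Int)) : Bool :=
  match nested_list with
  | [] => false  -- unreachable under Pre_: Python raises IndexError on nested_list[0]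
  | h :: _ => pyOuterA nested_list h true

-- ===== PORT B =====
-- Source B's value test is 'type(x) is int and 0 <= x <= 255'; the type test is identically
-- true under the type convention (elements are Int), leaving the range test.
def is_valid_image_alt (nested_list : List (List Int)) : Bool :=
  let n := (nested_list.headD []).length  -- nested_list[0]; Pre_ guarantees nonempty
  if nested_list.any (fun row => row.length ≠ n) then false
  else nested_list.all (fun row => row.all (fun x => 0 ≤ x && x ≤ 255))

-- ===== PRECONDITION & SPEC =====
-- Pre_ excludes only the empty list, on which both Pythons raise IndexError at nested_list[0].
def Pre_is_valid_image (nested_list : List (List Int)) : Prop := nested_list ≠ []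
instance (nested_list : List (List Int)) : Decidable (Pre_is_valid_image nested_list) := by unfold Pre_is_valid_image; infer_instance
def pvWitness_is_valid_image : List (List Int) := [[1, 2], [4, 5]]
def Spec_is_valid_image (nested_list : List (List Int)) (out : Bool) : Prop := out = is_valid_image_alt nested_list
instance (nested_list : List (List Int)) (out : Bool) : Decidable (Spec_is_valid_image nested_list out) := by unfold Spec_is_valid_image; infer_instance

-- ===== CLAIM (what is proved, stated in full; the proofs are below) =====
def Claim_equal_is_valid_image : Prop := ∀ (nested_list : List (List Int)), Dom_is_valid_image nested_list → Pre_is_valid_image nested_list → Spec_is_valid_image nested_list (is_valid_image nested_list)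

-- ===== LEMMAS AND PROOFS =====
theorem pyInnerA_eq (elmnt : List Int) (v : Bool) :
    pyInnerA elmnt v = (v && elmnt.all (fun x => 0 ≤ x && x ≤ 255)) := by
  induction elmnt with
  | nil => simp [pyInnerA]
  | cons x rest ih =>
    simp only [pyInnerA, List.all_cons, ih]
    by_cases h : x < 0 ∨ x > 255
    · have : (decide (0 ≤ x) && decide (x ≤ 255)) = false := by
        rcases h with h | h <;> simp <;> omega
      simp [h, this]
    · have h0 : 0 ≤ x := by omega
      have h1 : x ≤ 255 := by omega
      simp [h, h0, h1]

theorem pyOuterA_eq (rows : List (List Int)) (prev : List Int) (v : Bool) :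
    pyOuterA rows prev v =
      (if rows.all (fun e => e.length = prev.length) then
        v && rows.all (fun e => e.all (fun x => 0 ≤ x && x ≤ 255))
      else false) := by
  induction rows generalizing prev v with
  | nil => simp [pyOuterA]
  | cons e rest ih =>
    simp only [pyOuterA, List.all_cons]
    by_cases h : e.length = prev.length
    · simp [h, ih, pyInnerA_eq, Bool.and_left_comm, Bool.and_assoc]
    · simp [h]

-- ===== VERDICT (by name: the statement is the Claim_ definition above) =====
theorem is_valid_image_spec : Claim_equal_is_valid_image := by
  intro nested_list _ hpre
  unfold Spec_is_valid_image
  match nested_list, hpre with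
  | h :: t, _ =>
    simp only [is_valid_image, is_valid_image_alt, List.headD_cons]
    rw [pyOuterA_eq]
    simp only [List.all_cons, List.any_cons]
    split_ifs with h1 h2 h2 <;>
      simp_all [List.all_eq_true, List.any_eq_true] <;> tauto
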